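-- pv_equiv track=rewrite | github.com/YILING0013/AI_NovelGenerator | prompts/constants.py | get_volume_info
-- ===== SOURCE A (Python) =====
-- VOLUME_MAPPING = {
--     (1, 80): {
--         "volume": "第一卷",
--         "name": "系统觉醒篇",
--         "subacts": {
--             (1, 27): "子幕1：觉醒触发",
--             (28, 67): "子幕2：初试锋芒",
--             (68, 80): "子幕3：声名鹊起"
--         }
--     },
--     (81, 160): {
--         "volume": "第二卷",
--         "name": "宗门争霸篇",
--         "subacts": {
--             (81, 107): "子幕1：暗流涌动",
--             (108, 147): "子幕2：群雄逐鹿",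
--             (148, 160): "子幕3：霸业初成"
--         }
--     },
--     (161, 240): {
--         "volume": "第三卷",
--         "name": "复仇之路篇",
--         "subacts": {
--             (161, 187): "子幕1：真相初现",
--             (188, 227): "子幕2：血海深仇",
--             (228, 240): "子幕3：尘埃落定"
--         }
--     },
--     (241, 320): {
--         "volume": "第四卷",
--         "name": "统一天下篇",
--         "subacts": {
--             (241, 267): "子幕1：势力雏形",
--             (268, 307): "子幕2：纵横捭阖",
--             (308, 320): "子幕3：天下归心"
--         }
--     },
--     (321, 400): {
--         "volume": "第五卷",
--         "name": "飞升成仙篇",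
--         "subacts": {
--             (321, 347): "子幕1：天劫将至",
--             (348, 387): "子幕2：灭世浩劫",
--             (388, 400): "子幕3：飞升仙界"
--         }
--     }
-- }
--
-- def get_volume_info(chapter_num: int) -> dict:
--     """
--     根据章节号获取正确的分卷信息
--
--     Args:
--         chapter_num: 章节号 (1-400)
--
--     Returns:
--         包含 volume, name, subact, position_text 的字典
--     """
--     for (start, end), info in VOLUME_MAPPING.items():
--         if start <= chapter_num <= end:
--             # 获取子幕信息
--             subact = "未知子幕"
--             for (sub_start, sub_end), subact_name in info["subacts"].items():
--                 if sub_start <= chapter_num <= sub_end: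
--                     subact = subact_name
--                     break
--
--             return {
--                 "volume": info["volume"],
--                 "name": info["name"],
--                 "subact": subact,
--                 "full_position": f"{info['volume']}：{info['name']} - {subact}",
--                 "position_text": f"【分卷定位】当前第{chapter_num}章属于{info['volume']}·{info['name']}的{subact}阶段"
--             }
--
--     # 超出400章的情况
--     return {
--         "volume": "第五卷+",
--         "name": "续章",
--         "subact": "扩展内容",
--         "full_position": "第五卷+：续章 - 扩展内容",
--         "position_text": f"【分卷定位】第{chapter_num}章已超出原定400章规划"
--     }
-- ===== SOURCE B (Python) =====
-- # B: direct arithmetic indexing into parallel tables instead of scanning nested range-keyed dicts.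
-- VOLS = [
--     ("第一卷", "系统觉醒篇", ["子幕1：觉醒触发", "子幕2：初试锋芒", "子幕3：声名鹊起"]),
--     ("第二卷", "宗门争霸篇", ["子幕1：暗流涌动", "子幕2：群雄逐鹿", "子幕3：霸业初成"]),
--     ("第三卷", "复仇之路篇", ["子幕1：真相初现", "子幕2：血海深仇", "子幕3：尘埃落定"]),
--     ("第四卷", "统一天下篇", ["子幕1：势力雏形", "子幕2：纵横捭阖", "子幕3：天下归心"]),
--     ("第五卷", "飞升成仙篇", ["子幕1：天劫将至", "子幕2：灭世浩劫", "子幕3：飞升仙界"]),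
-- ]
--
-- def get_volume_info(chapter_num: int) -> dict:
--     if chapter_num < 1 or chapter_num > 400:
--         return {
--             "volume": "第五卷+",
--             "name": "续章",
--             "subact": "扩展内容",
--             "full_position": "第五卷+：续章 - 扩展内容",
--             "position_text": f"【分卷定位】第{chapter_num}章已超出原定400章规划",
--         }
--     vi = (chapter_num - 1) // 80
--     off = chapter_num - (80 * vi + 1)
--     volume, name, subs = VOLS[vi]
--     si = 0 if off < 27 else (1 if off < 67 else 2)
--     subact = subs[si]
--     return {
--         "volume": volume,
--         "name": name,
--         "subact": subact,
--         "full_position": f"{volume}：{name} - {subact}",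
--         "position_text": f"【分卷定位】当前第{chapter_num}章属于{volume}·{name}的{subact}阶段",
--     }
-- ===== Notes on version B (the rewrite author's own statement) =====
-- stated objective: simpler
-- what changed: Replaces A's nested scans over range-keyed dicts with direct arithmetic: the volume index is (chapter_num-1) floor-divided by the volume length, which indexes small parallel tables, and the subact is chosen by thresholding the offset inside the volume.
import Mathlib
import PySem

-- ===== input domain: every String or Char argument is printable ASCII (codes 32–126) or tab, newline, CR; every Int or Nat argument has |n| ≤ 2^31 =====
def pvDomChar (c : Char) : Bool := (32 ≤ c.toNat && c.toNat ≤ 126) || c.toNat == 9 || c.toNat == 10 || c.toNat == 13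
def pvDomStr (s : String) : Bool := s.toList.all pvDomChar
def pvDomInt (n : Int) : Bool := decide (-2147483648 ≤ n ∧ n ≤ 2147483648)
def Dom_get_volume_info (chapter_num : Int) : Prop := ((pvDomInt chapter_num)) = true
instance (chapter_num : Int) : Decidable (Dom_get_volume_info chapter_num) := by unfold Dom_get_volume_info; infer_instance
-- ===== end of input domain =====

-- B replaces A's nested scans over range-keyed dicts with direct arithmetic table indexing (objective: simpler).

-- ===== PORT A =====
-- VOLUME_MAPPING: a dict keyed by (start, end) with value {"volume":…, "name":…, "subacts": dict};
-- transliterated as an insertion-ordered association list, the info dict as a product (volume, name, subacts).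
def volumeMapping : List ((Int × Int) × (String × String × List ((Int × Int) × String))) :=
  [ ((1, 80),   ("第一卷", "系统觉醒篇", [((1, 27), "子幕1：觉醒触发"), ((28, 67), "子幕2：初试锋芒"), ((68, 80), "子幕3：声名鹊起")])),
    ((81, 160), ("第二卷", "宗门争霸篇", [((81, 107), "子幕1：暗流涌动"), ((108, 147), "子幕2：群雄逐鹿"), ((148, 160), "子幕3：霸业初成")])),
    ((161, 240),("第三卷", "复仇之路篇", [((161, 187), "子幕1：真相初现"), ((188, 227), "子幕2：血海深仇"), ((228, 240), "子幕3：尘埃落定")])),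
    ((241, 320),("第四卷", "统一天下篇", [((241, 267), "子幕1：势力雏形"), ((268, 307), "子幕2：纵横捭阖"), ((308, 320), "子幕3：天下归心")])),
    ((321, 400),("第五卷", "飞升成仙篇", [((321, 347), "子幕1：天劫将至"), ((348, 387), "子幕2：灭世浩劫"), ((388, 400), "子幕3：飞升仙界")])) ]

-- A's inner loop: subact = "未知子幕"; for …: if match: subact = name; break
def findSubact (n : Int) : List ((Int × Int) × String) → String
  | [] => "未知子幕"
  | ((s, e), name) :: rest => if s ≤ n ∧ n ≤ e then name else findSubact n rest

-- A's outer loop with the post-loop fallback return at the end of the list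
def volLoop (n : Int) : List ((Int × Int) × (String × String × List ((Int × Int) × String))) → List (String × String)
  | [] =>
    [("volume", "第五卷+"), ("name", "续章"), ("subact", "扩展内容"),
     ("full_position", "第五卷+：续章 - 扩展内容"),
     ("position_text", PySem.Str.join "" ["【分卷定位】第", PySem.Int.toStr n, "章已超出原定400章规划"])]
  | ((s, e), (vol, nm, subs)) :: rest =>
    if s ≤ n ∧ n ≤ e then
      let subact := findSubact n subs
      [("volume", vol), ("name", nm), ("subact", subact),
       ("full_position", PySem.Str.join "" [vol, "：", nm, " - ", subact]),
       ("position_text", PySem.Str.join "" ["【分卷定位】当前第", PySem.Int.toStr n, "章属于", vol, "·", nm, "的", subact, "阶段"])]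
    else volLoop n rest

def get_volume_info (chapter_num : Int) : List (String × String) :=
  volLoop chapter_num volumeMapping

-- ===== PORT B =====
def bVols : List (String × String × List String) :=
  [ ("第一卷", "系统觉醒篇", ["子幕1：觉醒触发", "子幕2：初试锋芒", "子幕3：声名鹊起"]),
    ("第二卷", "宗门争霸篇", ["子幕1：暗流涌动", "子幕2：群雄逐鹿", "子幕3：霸业初成"]),
    ("第三卷", "复仇之路篇", ["子幕1：真相初现", "子幕2：血海深仇", "子幕3：尘埃落定"]),
    ("第四卷", "统一天下篇", ["子幕1：势力雏形", "子幕2：纵横捭阖", "子幕3：天下归心"]),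
    ("第五卷", "飞升成仙篇", ["子幕1：天劫将至", "子幕2：灭世浩劫", "子幕3：飞升仙界"]) ]

def get_volume_info_alt (chapter_num : Int) : List (String × String) :=
  if chapter_num < 1 ∨ 400 < chapter_num then
    [("volume", "第五卷+"), ("name", "续章"), ("subact", "扩展内容"),
     ("full_position", "第五卷+：续章 - 扩展内容"),
     ("position_text", PySem.Str.join "" ["【分卷定位】第", PySem.Int.toStr chapter_num, "章已超出原定400章规划"])]
  else
    let vi := PySem.Int.floordiv (chapter_num - 1) 80
    let off := chapter_num - (80 * vi + 1)
    -- VOLS[vi] cannot be out of range when 1 ≤ chapter_num ≤ 400; getD is never taken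
    let v := (PySem.List.pyGet? bVols vi).getD ("", "", [])
    let si : Int := if off < 27 then 0 else if off < 67 then 1 else 2
    let subact := (PySem.List.pyGet? v.2.2 si).getD ""
    [("volume", v.1), ("name", v.2.1), ("subact", subact),
     ("full_position", PySem.Str.join "" [v.1, "：", v.2.1, " - ", subact]),
     ("position_text", PySem.Str.join "" ["【分卷定位】当前第", PySem.Int.toStr chapter_num, "章属于", v.1, "·", v.2.1, "的", subact, "阶段"])]

-- ===== PRECONDITION & SPEC =====
def Spec_get_volume_info (chapter_num : Int) (out : List (String × String)) : Prop := out = get_volume_info_alt chapter_num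
instance (chapter_num : Int) (out : List (String × String)) : Decidable (Spec_get_volume_info chapter_num out) := by unfold Spec_get_volume_info; infer_instance

-- ===== CLAIM (what is proved, stated in full; the proofs are below) =====
def Claim_equal_get_volume_info : Prop := ∀ (chapter_num : Int), Dom_get_volume_info chapter_num → Spec_get_volume_info chapter_num (get_volume_info chapter_num)

-- ===== LEMMAS AND PROOFS =====

-- one lemma per volume: on the k-th volume's chapter range both ports reduce to the same branch
set_option maxHeartbeats 1000000 in
theorem pv_case1 (n : Int) (hout : ¬(n < 1 ∨ 400 < n)) (hk : (n - 1) / 80 = 0)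
    (ha : 1 ≤ n) (hb : n ≤ 80) : get_volume_info n = get_volume_info_alt n := by
  have hq : PySem.Int.floordiv (n - 1) 80 = (n - 1) / 80 :=
    PySem.Int.floordiv_eq_ediv_of_pos (by norm_num)
  have e1 : (PySem.List.pyGet? bVols (0 : Int)).getD ("", "", []) =
      ("第一卷", "系统觉醒篇", ["子幕1：觉醒触发", "子幕2：初试锋芒", "子幕3：声名鹊起"]) := rfl
  simp only [get_volume_info, get_volume_info_alt, volumeMapping, volLoop, findSubact,
    hq, hk, if_neg hout, e1]
  split_ifs <;> first | rfl | omega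

set_option maxHeartbeats 1000000 in
theorem pv_case2 (n : Int) (hout : ¬(n < 1 ∨ 400 < n)) (hk : (n - 1) / 80 = 1)
    (ha : 81 ≤ n) (hb : n ≤ 160) : get_volume_info n = get_volume_info_alt n := by
  have hq : PySem.Int.floordiv (n - 1) 80 = (n - 1) / 80 :=
    PySem.Int.floordiv_eq_ediv_of_pos (by norm_num)
  have e1 : (PySem.List.pyGet? bVols (1 : Int)).getD ("", "", []) =
      ("第二卷", "宗门争霸篇", ["子幕1：暗流涌动", "子幕2：群雄逐鹿", "子幕3：霸业初成"]) := rfl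
  simp only [get_volume_info, get_volume_info_alt, volumeMapping, volLoop, findSubact,
    hq, hk, if_neg hout, e1]
  split_ifs <;> first | rfl | omega

set_option maxHeartbeats 1000000 in
theorem pv_case3 (n : Int) (hout : ¬(n < 1 ∨ 400 < n)) (hk : (n - 1) / 80 = 2)
    (ha : 161 ≤ n) (hb : n ≤ 240) : get_volume_info n = get_volume_info_alt n := by
  have hq : PySem.Int.floordiv (n - 1) 80 = (n - 1) / 80 :=
    PySem.Int.floordiv_eq_ediv_of_pos (by norm_num)
  have e1 : (PySem.List.pyGet? bVols (2 : Int)).getD ("", "", []) =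
      ("第三卷", "复仇之路篇", ["子幕1：真相初现", "子幕2：血海深仇", "子幕3：尘埃落定"]) := rfl
  simp only [get_volume_info, get_volume_info_alt, volumeMapping, volLoop, findSubact,
    hq, hk, if_neg hout, e1]
  split_ifs <;> first | rfl | omega

set_option maxHeartbeats 1000000 in
theorem pv_case4 (n : Int) (hout : ¬(n < 1 ∨ 400 < n)) (hk : (n - 1) / 80 = 3)
    (ha : 241 ≤ n) (hb : n ≤ 320) : get_volume_info n = get_volume_info_alt n := by
  have hq : PySem.Int.floordiv (n - 1) 80 = (n - 1) / 80 :=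
    PySem.Int.floordiv_eq_ediv_of_pos (by norm_num)
  have e1 : (PySem.List.pyGet? bVols (3 : Int)).getD ("", "", []) =
      ("第四卷", "统一天下篇", ["子幕1：势力雏形", "子幕2：纵横捭阖", "子幕3：天下归心"]) := rfl
  simp only [get_volume_info, get_volume_info_alt, volumeMapping, volLoop, findSubact,
    hq, hk, if_neg hout, e1]
  split_ifs <;> first | rfl | omega

set_option maxHeartbeats 1000000 in
theorem pv_case5 (n : Int) (hout : ¬(n < 1 ∨ 400 < n)) (hk : (n - 1) / 80 = 4)
    (ha : 321 ≤ n) (hb : n ≤ 400) : get_volume_info n = get_volume_info_alt n := by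
  have hq : PySem.Int.floordiv (n - 1) 80 = (n - 1) / 80 :=
    PySem.Int.floordiv_eq_ediv_of_pos (by norm_num)
  have e1 : (PySem.List.pyGet? bVols (4 : Int)).getD ("", "", []) =
      ("第五卷", "飞升成仙篇", ["子幕1：天劫将至", "子幕2：灭世浩劫", "子幕3：飞升仙界"]) := rfl
  simp only [get_volume_info, get_volume_info_alt, volumeMapping, volLoop, findSubact,
    hq, hk, if_neg hout, e1]
  split_ifs <;> first | rfl | omega

theorem pv_case_out (n : Int) (hout : n < 1 ∨ 400 < n) :
    get_volume_info n = get_volume_info_alt n := by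
  simp only [get_volume_info, get_volume_info_alt, volumeMapping, volLoop, if_pos hout]
  split_ifs <;> first | rfl | omega

-- ===== VERDICT (by name: the statement is the Claim_ definition above) =====
theorem get_volume_info_spec : Claim_equal_get_volume_info := by
  intro n _
  unfold Spec_get_volume_info
  by_cases hout : n < 1 ∨ 400 < n
  · exact pv_case_out n hout
  · have hv : ((n - 1) / 80 = 0 ∧ 1 ≤ n ∧ n ≤ 80) ∨ ((n - 1) / 80 = 1 ∧ 81 ≤ n ∧ n ≤ 160) ∨
        ((n - 1) / 80 = 2 ∧ 161 ≤ n ∧ n ≤ 240) ∨ ((n - 1) / 80 = 3 ∧ 241 ≤ n ∧ n ≤ 320) ∨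
        ((n - 1) / 80 = 4 ∧ 321 ≤ n ∧ n ≤ 400) := by omega
    rcases hv with ⟨hk, ha, hb⟩ | ⟨hk, ha, hb⟩ | ⟨hk, ha, hb⟩ | ⟨hk, ha, hb⟩ | ⟨hk, ha, hb⟩
    · exact pv_case1 n hout hk ha hb
    · exact pv_case2 n hout hk ha hb
    · exact pv_case3 n hout hk ha hb
    · exact pv_case4 n hout hk ha hb
    · exact pv_case5 n hout hk ha hb
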